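-- pv_equiv track=rewrite | github.com/tasker-systems/storyteller | tools/narrative-data/src/narrative_data/persistence/trope_families.py | extract_trope_families
-- ===== SOURCE A (Python) =====
-- def _slug_to_display_name(slug: str) -> str:
--     """Convert slug to display name: 'locus-of-power' → 'Locus of Power'."""
--     return " ".join(
--         word.capitalize() if i == 0 or len(word) > 2 else word
--         for i, word in enumerate(slug.split("-"))
--     )
--
-- def extract_trope_families(normalization_map: dict[str, str]) -> list[dict]:
--     """Deduplicate canonical families from the normalization map."""
--     seen: dict[str, dict] = {}
--     for _raw, slug in normalization_map.items():
--         if slug not in seen: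
--             seen[slug] = {
--                 "slug": slug,
--                 "name": _slug_to_display_name(slug),
--                 "description": None,
--             }
--     return sorted(seen.values(), key=lambda f: f["slug"])
-- ===== SOURCE B (Python) =====
-- def _slug_to_display_name(slug: str) -> str:
--     """Convert slug to display name: 'locus-of-power' → 'Locus of Power'."""
--     return " ".join(
--         word.capitalize() if i == 0 or len(word) > 2 else word
--         for i, word in enumerate(slug.split("-"))
--     )
--
-- def extract_trope_families(normalization_map: dict[str, str]) -> list[dict]:
--     """Deduplicate canonical families from the normalization map.
--
--     Sort ALL canonical slugs first (duplicates included); one linear scan then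
--     skips adjacent duplicates (equal slugs are adjacent after sorting) and
--     builds each record as it is emitted.
--     """
--     records = []
--     prev = None
--     for slug in sorted(normalization_map.values()):
--         if slug != prev:
--             records.append({
--                 "slug": slug,
--                 "name": _slug_to_display_name(slug),
--                 "description": None,
--             })
--             prev = slug
--     return records
-- ===== Notes on version B (the rewrite author's own statement) =====
-- stated objective: alternative
-- what changed: B replaces A's hash-dict dedup-then-sort-records with sort-then-scan: it sorts the full multiset of values (duplicates included), then a single linear pass emits a record whenever the slug differs from the previously emitted one, so deduplication happens by adjacency after sorting instead of by dict membership before it.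
import Mathlib
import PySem

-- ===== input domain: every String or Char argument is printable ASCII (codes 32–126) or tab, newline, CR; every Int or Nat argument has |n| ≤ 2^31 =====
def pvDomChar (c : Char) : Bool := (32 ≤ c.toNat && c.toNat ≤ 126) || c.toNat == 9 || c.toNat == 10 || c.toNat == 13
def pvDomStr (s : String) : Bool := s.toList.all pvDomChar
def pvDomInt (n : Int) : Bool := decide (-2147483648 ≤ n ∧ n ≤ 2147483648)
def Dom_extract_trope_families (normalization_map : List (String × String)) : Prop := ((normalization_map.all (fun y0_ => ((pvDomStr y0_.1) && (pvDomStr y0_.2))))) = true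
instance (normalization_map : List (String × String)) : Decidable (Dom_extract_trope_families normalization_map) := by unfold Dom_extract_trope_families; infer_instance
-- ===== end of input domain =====

-- B sorts ALL canonical slugs first (duplicates included) and then makes one linear scan that
-- skips adjacent duplicates and builds each record as it is emitted, instead of A's dedup via a
-- dict of pre-built records followed by sorting those records by a key lambda.
-- Equivalence of the RETURN value is proved for all inputs (no Pre_).

-- The Python parameter is a dict; its association-list representation is decoded with the
-- first binding of each key winning (both ports start from the same decoded dict).
def pvDictOfAssoc (m : List (String × String)) : PySem.Dict String String :=
  m.foldl (fun d kv => d.setdefault kv.1 kv.2) PySem.Dict.empty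

-- word.capitalize(): first char uppercased, the rest lowered (exact on the ASCII domain)
def pvCapitalize : List Char → List Char
  | [] => []
  | c :: rest => PySem.Chars.upperChar c :: rest.map PySem.Chars.lowerChar

-- _slug_to_display_name (shared helper of both Pythons, ported once)
def slugToDisplayName (slug : String) : String :=
  String.ofList (PySem.Chars.join [' ']
    ((PySem.List.enumerate (PySem.Chars.splitOn slug.toList ['-'])).map
      (fun iw => if iw.1 == 0 || iw.2.length > 2 then pvCapitalize iw.2 else iw.2)))

-- ===== PORT A =====
-- the key lambda f: f["slug"]: every record stores some _ at "slug", so the double getD is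
-- a total unwrapping of the representation's Option and the lookup is exact
def extract_trope_families (normalization_map : List (String × String)) : List (List (String × Option String)) :=
  let d := pvDictOfAssoc normalization_map
  let seen : PySem.Dict String (List (String × Option String)) :=
    d.items.foldl (fun seen kv =>
      if seen.contains kv.2 then seen
      else seen.insert kv.2
        [("slug", some kv.2), ("name", some (slugToDisplayName kv.2)), ("description", none)])
      PySem.Dict.empty
  PySem.List.sorted seen.values (fun f => (((PySem.Dict.mk f).get? "slug").getD none).getD "") false

-- ===== PORT B =====
-- one fold over sorted(d.values()) carrying (records built so far, previously emitted slug)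
def extract_trope_families_alt (normalization_map : List (String × String)) : List (List (String × Option String)) :=
  let d := pvDictOfAssoc normalization_map
  ((PySem.List.sorted d.values (fun s => s) false).foldl
    (fun st slug =>
      if some slug ≠ st.2 then
        (st.1 ++ [[("slug", some slug), ("name", some (slugToDisplayName slug)), ("description", none)]],
         some slug)
      else st)
    ([], none)).1

-- ===== PRECONDITION & SPEC =====
def Spec_extract_trope_families (normalization_map : List (String × String)) (out : List (List (String × Option String))) : Prop := out = extract_trope_families_alt normalization_map
instance (normalization_map : List (String × String)) (out : List (List (String × Option String))) : Decidable (Spec_extract_trope_families normalization_map out) := by unfold Spec_extract_trope_families; infer_instance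

-- ===== CLAIM (what is proved, stated in full; the proofs are below) =====
def Claim_equal_extract_trope_families : Prop := ∀ (normalization_map : List (String × String)), Dom_extract_trope_families normalization_map → Spec_extract_trope_families normalization_map (extract_trope_families normalization_map)

-- ===== LEMMAS AND PROOFS =====

-- the record built for a slug
def pvRec (s : String) : List (String × Option String) :=
  [("slug", some s), ("name", some (slugToDisplayName s)), ("description", none)]

theorem pvRec_key (s : String) :
    (((PySem.Dict.mk (pvRec s)).get? "slug").getD none).getD "" = s := by
  simp [pvRec, PySem.Dict.get?_mk_cons]

-- the slug-level content of B's scan: drop elements equal to the previously kept one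
def pvDedup (prev : Option String) : List String → List String
  | [] => []
  | s :: L => if some s ≠ prev then s :: pvDedup (some s) L else pvDedup prev L

-- B's fold builds exactly the records of pvDedup
theorem pv_fold_dedup (L : List String) : ∀ (acc : List (List (String × Option String))) (prev : Option String),
    (L.foldl (fun st slug =>
        if some slug ≠ st.2 then (st.1 ++ [pvRec slug], some slug) else st) (acc, prev)).1
      = acc ++ (pvDedup prev L).map pvRec := by
  induction L with
  | nil => intro acc prev; simp [pvDedup]
  | cons s L ih =>
    intro acc prev
    rw [List.foldl_cons]
    by_cases h : some s = prev
    · rw [if_neg (fun hn => hn h), ih]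
      simp [pvDedup, h]
    · rw [if_pos h, ih]
      simp [pvDedup, h]

-- on a ≤-sorted list whose elements all dominate prev, the scan yields a strictly
-- increasing list containing exactly the elements other than prev
theorem pv_dedup_sorted (L : List String) (h : L.Pairwise (· ≤ ·)) :
    ∀ (p : Option String), (∀ x ∈ L, ∀ q, p = some q → q ≤ x) →
      (pvDedup p L).Pairwise (· < ·) ∧ (∀ x, x ∈ pvDedup p L ↔ x ∈ L ∧ some x ≠ p) := by
  induction L with
  | nil => intro p _; simp [pvDedup]
  | cons s L ih =>
    intro p hp
    rcases List.pairwise_cons.mp h with ⟨hs, hL⟩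
    by_cases heq : some s = p
    · -- dropped: s equals prev
      have hIH := ih hL p (fun x hx q hq => hp x (List.mem_cons_of_mem _ hx) q hq)
      have hstep : pvDedup p (s :: L) = pvDedup p L := by simp [pvDedup, heq]
      rw [hstep]
      refine ⟨hIH.1, fun x => ?_⟩
      rw [hIH.2 x]
      constructor
      · rintro ⟨hx, hne⟩; exact ⟨List.mem_cons_of_mem _ hx, hne⟩
      · rintro ⟨hx, hne⟩
        rcases List.mem_cons.mp hx with rfl | hx
        · exact absurd heq hne
        · exact ⟨hx, hne⟩
    · -- kept: s starts a new run
      have hIH := ih hL (some s) (fun x hx q hq => by cases hq; exact hs x hx)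
      have hstep : pvDedup p (s :: L) = s :: pvDedup (some s) L := by
        simp [pvDedup, heq]
      rw [hstep]
      constructor
      · refine List.pairwise_cons.mpr ⟨?_, hIH.1⟩
        intro y hy
        rcases (hIH.2 y).mp hy with ⟨hyL, hyne⟩
        exact lt_of_le_of_ne (hs y hyL) (fun e => hyne (by rw [e]))
      · intro x
        simp only [List.mem_cons, hIH.2 x]
        constructor
        · rintro (rfl | ⟨hx, hne⟩)
          · exact ⟨Or.inl rfl, heq⟩
          · refine ⟨Or.inr hx, ?_⟩
            intro hxp
            rcases p with _ | q
            · simp at hxp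
            · have hqx : q ≤ x := hp x (List.mem_cons_of_mem _ hx) q rfl
              have hqs : q ≤ s := hp s (List.mem_cons_self) q rfl
              have hsx : s ≤ x := hs x hx
              have : x = q := by injection hxp
              have hsq : s = q := le_antisymm (this ▸ hsx) hqs
              exact heq (by rw [hsq])
        · rintro ⟨rfl | hx, hne⟩
          · exact Or.inl rfl
          · by_cases hxs : x = s
            · exact Or.inl hxs
            · exact Or.inr ⟨hx, fun e => hxs (by injection e)⟩

-- the sorted records are the records of the sorted slugs
theorem pv_sorted_records (S : List String)
    (hpw : (PySem.List.sorted S (fun s => s) false).Pairwise (· < ·)) :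
    PySem.List.sorted (S.map pvRec)
        (fun f => (((PySem.Dict.mk f).get? "slug").getD none).getD "") false
      = (PySem.List.sorted S (fun s => s) false).map pvRec := by
  apply PySem.List.sorted_eq_of_perm_of_pairwise_lt
  · exact (PySem.List.sorted_perm S (fun s => s) false).map pvRec
  · rw [List.pairwise_map]
    refine hpw.imp ?_
    intro a b hab
    simpa [pvRec_key] using hab

-- A's dedup loop, from a seen-dict holding records for the nodup slug list s,
-- ends with records for exactly (Set.update s vs)
theorem pv_fold_seen (vs : List String) : ∀ (s : List String),
    vs.foldl (fun seen v => if seen.contains v then seen else seen.insert v (pvRec v))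
        (PySem.Dict.mk (s.map (fun x => (x, pvRec x))))
      = PySem.Dict.mk ((PySem.Set.update s vs).map (fun x => (x, pvRec x))) := by
  induction vs with
  | nil => intro s; simp [PySem.Set.update]
  | cons v vs ih =>
    intro s
    have hc : (PySem.Dict.mk (s.map (fun x => (x, pvRec x)))).contains v
        = s.contains v := by
      simp [PySem.Dict.contains_mk, List.any_map, Function.comp_def, List.any_beq']
    by_cases hv : v ∈ s
    · have h1 : s.contains v = true := by simpa using hv
      have h2 : PySem.Set.add s v = s := by simp [PySem.Set.add, PySem.Set.contains, hv]
      simp only [List.foldl_cons, PySem.Set.update, hc, h1, if_pos]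
      simpa [PySem.Set.update, h2] using ih s
    · have h1 : s.contains v = false := by simpa using hv
      have h2 : PySem.Set.add s v = s ++ [v] := by
        simp [PySem.Set.add, PySem.Set.contains, hv]
      have hins : (PySem.Dict.mk (s.map (fun x => (x, pvRec x)))).insert v (pvRec v)
          = PySem.Dict.mk ((s ++ [v]).map (fun x => (x, pvRec x))) := by
        apply PySem.Dict.ext
        rw [PySem.Dict.items_insert_of_not_contains _ _ (by rw [hc, h1])]
        simp
      simp only [List.foldl_cons, hc, h1, Bool.false_eq_true, if_false, hins, PySem.Set.update]
      simpa [PySem.Set.update, h2] using ih (s ++ [v])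

-- B's slug list equals the sorted distinct slugs
theorem pv_dedup_eq_sorted_set (vs : List String) :
    pvDedup none (PySem.List.sorted vs (fun s => s) false)
      = PySem.List.sorted (PySem.Set.ofList vs) (fun s => s) false := by
  have hsort : (PySem.List.sorted vs (fun s => s) false).Pairwise (· ≤ ·) :=
    PySem.List.sorted_pairwise vs (fun s => s)
  have hd := pv_dedup_sorted _ hsort none (fun x _ q hq => nomatch hq)
  have hmemD : ∀ x, x ∈ pvDedup none (PySem.List.sorted vs (fun s => s) false) ↔ x ∈ vs := by
    intro x
    rw [(hd.2 x)]
    simp [PySem.List.mem_sorted]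
  have hmemS : ∀ x, x ∈ (PySem.Set.ofList vs : List String) ↔ x ∈ vs := fun x =>
    PySem.Set.mem_ofList vs x
  have hnodupD : (pvDedup none (PySem.List.sorted vs (fun s => s) false)).Nodup :=
    hd.1.imp ne_of_lt
  have hnodupS : (PySem.Set.ofList vs : List String).Nodup := PySem.Set.nodup_ofList vs
  have hperm : (pvDedup none (PySem.List.sorted vs (fun s => s) false)).Perm
      (PySem.Set.ofList vs) := by
    rw [List.perm_ext_iff_of_nodup hnodupD hnodupS]
    intro a; rw [hmemD a, hmemS a]
  exact (PySem.List.sorted_eq_of_perm_of_pairwise_lt _ _ _ hperm hd.1).symm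

-- ===== VERDICT (by name: the statement is the Claim_ definition above) =====
theorem extract_trope_families_spec : Claim_equal_extract_trope_families := by
  intro m _
  unfold Spec_extract_trope_families extract_trope_families extract_trope_families_alt
  set d := pvDictOfAssoc m with hd
  -- A's side: the seen-dict holds the records of the distinct slugs in first-seen order
  have hfold : d.items.foldl (fun seen kv =>
        if seen.contains kv.2 then seen else seen.insert kv.2 (pvRec kv.2)) PySem.Dict.empty
      = PySem.Dict.mk ((PySem.Set.ofList d.values).map (fun x => (x, pvRec x))) := by
    have h1 : d.items.foldl (fun seen kv =>
          if seen.contains kv.2 then seen else seen.insert kv.2 (pvRec kv.2)) PySem.Dict.empty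
        = (d.items.map (·.2)).foldl (fun seen v =>
            if seen.contains v then seen else seen.insert v (pvRec v)) PySem.Dict.empty := by
      rw [List.foldl_map]
    rw [h1]
    have h2 := pv_fold_seen (d.items.map (·.2)) []
    simpa [PySem.Set.update_nil_left, PySem.Dict.values] using h2
  have hvals : (PySem.Dict.mk ((PySem.Set.ofList d.values).map (fun x => (x, pvRec x)))).values
      = (PySem.Set.ofList d.values).map pvRec := by
    simp [PySem.Dict.values, List.map_map, Function.comp]
  show PySem.List.sorted _ _ _ = _
  rw [show (fun seen kv => if PySem.Dict.contains seen kv.2 then seen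
        else seen.insert kv.2 [("slug", some kv.2), ("name", some (slugToDisplayName kv.2)),
          ("description", none)])
      = (fun (seen : PySem.Dict String (List (String × Option String))) (kv : String × String) =>
          if seen.contains kv.2 then seen else seen.insert kv.2 (pvRec kv.2)) from rfl]
  rw [hfold, hvals]
  rw [pv_sorted_records (PySem.Set.ofList d.values) (PySem.List.sorted_ofList_pairwise_lt d.values)]
  -- B's side: the fold is the records of pvDedup, and pvDedup = sorted distinct slugs
  rw [show (fun (st : List (List (String × Option String)) × Option String) (slug : String) =>
        if some slug ≠ st.2 then
          (st.1 ++ [[("slug", some slug), ("name", some (slugToDisplayName slug)),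
            ("description", none)]], some slug)
        else st)
      = (fun (st : List (List (String × Option String)) × Option String) (slug : String) =>
          if some slug ≠ st.2 then (st.1 ++ [pvRec slug], some slug) else st) from rfl]
  rw [pv_fold_dedup _ [] none, pv_dedup_eq_sorted_set]
  simp
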